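-- pv_equiv track=rewrite | github.com/William-Zhan-bot/2021-Python-X- | 6.20 練習題 參考解答/標題製作.py | title_maker
-- ===== SOURCE A (Python) =====
-- def title_maker(word):
--     w = []
--     for i in range(len(word)):
--         if i == 0:
--             w.append(word[i].upper())
--         else:
--             w.append(word[i])
--     result = "".join(w)
--     return result
-- ===== SOURCE B (Python) =====
-- def title_maker(word):
--     return word[:1].upper() + word[1:]
-- ===== Notes on version B (the rewrite author's own statement) =====
-- stated objective: idiomatic
-- what changed: Replaced the index loop that builds a list of characters and joins it with the closed-form slice expression word[:1].upper() + word[1:], removing the per-character Python-level loop.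
import Mathlib
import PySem

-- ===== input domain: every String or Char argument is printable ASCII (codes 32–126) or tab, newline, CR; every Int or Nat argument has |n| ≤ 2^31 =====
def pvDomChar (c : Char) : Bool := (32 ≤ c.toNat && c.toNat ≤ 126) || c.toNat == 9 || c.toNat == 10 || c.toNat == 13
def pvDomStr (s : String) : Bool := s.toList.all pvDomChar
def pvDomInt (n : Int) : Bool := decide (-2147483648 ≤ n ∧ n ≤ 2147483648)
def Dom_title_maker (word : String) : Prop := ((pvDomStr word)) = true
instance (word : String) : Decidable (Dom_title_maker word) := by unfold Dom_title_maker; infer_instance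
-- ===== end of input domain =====

-- B replaces A's character-by-character loop+join with the closed form word[:1].upper() + word[1:] (idiomatic, no loop).

-- ===== PORT A =====
-- literal port: build w by appending word[i].upper() for i == 0, word[i] otherwise, then "".join(w)
def title_maker (word : String) : String :=
  let cs := word.toList
  let w : List (List Char) :=
    (PySem.List.pyRange 0 (PySem.List.len cs)).foldl
      (fun w i =>
        if i == 0 then w ++ [PySem.Chars.upper [PySem.List.pyGetD cs i ' ']]
        else w ++ [[PySem.List.pyGetD cs i ' ']]) []
  String.mk (PySem.Chars.join [] w)

-- ===== PORT B =====
-- literal port of Source B: word[:1].upper() + word[1:]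
def title_maker_alt (word : String) : String :=
  let cs := word.toList
  String.mk (PySem.Chars.upper (PySem.List.slice cs none (some 1)) ++ PySem.List.slice cs (some 1) none)

-- ===== PRECONDITION & SPEC =====
def Spec_title_maker (word : String) (out : String) : Prop := out = title_maker_alt word
instance (word : String) (out : String) : Decidable (Spec_title_maker word out) := by unfold Spec_title_maker; infer_instance

-- ===== CLAIM (what is proved, stated in full; the proofs are below) =====
def Claim_equal_title_maker : Prop := ∀ (word : String), Dom_title_maker word → Spec_title_maker word (title_maker word)

-- ===== LEMMAS AND PROOFS =====

theorem title_maker_lists (cs : List Char) :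
    (PySem.List.pyRange 0 (PySem.List.len cs)).foldl
      (fun w i =>
        if i == 0 then w ++ [PySem.Chars.upper [PySem.List.pyGetD cs i ' ']]
        else w ++ [[PySem.List.pyGetD cs i ' ']]) [] =
    (match cs with
     | [] => []
     | c :: rest => PySem.Chars.upper [c] :: rest.map (fun x => [x])) := by
  have hfun : (fun (w : List (List Char)) (i : Int) =>
        if i == 0 then w ++ [PySem.Chars.upper [PySem.List.pyGetD cs i ' ']]
        else w ++ [[PySem.List.pyGetD cs i ' ']]) =
      (fun w i => w ++ [if i == 0 then PySem.Chars.upper [PySem.List.pyGetD cs i ' ']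
                        else [PySem.List.pyGetD cs i ' ']]) := by
    funext w i; split <;> rfl
  rw [hfun, PySem.List.foldl_append_singleton_eq_map]
  cases cs with
  | nil => rfl
  | cons c rest =>
    have hlen : (0 : Int) < PySem.List.len (c :: rest) := by
      simp [PySem.List.len]
    have hrange := PySem.List.map_pyGetD_pyRange_zero (c :: rest) ' '
    rw [PySem.List.pyRange_one_cons hlen] at hrange ⊢
    simp only [List.map_cons, List.nil_append] at hrange ⊢
    have htail : List.map (fun j => PySem.List.pyGetD (c :: rest) j ' ')
        (PySem.List.pyRange (0 + 1) (PySem.List.len (c :: rest))) = rest := by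
      exact (List.cons.injEq _ _ _ _ ▸ hrange).2
    have hne : ∀ i ∈ PySem.List.pyRange (0 + 1) (PySem.List.len (c :: rest)), (i == 0) = false := by
      intro i hi
      have := (PySem.List.mem_pyRange_one.mp hi).1
      simp; omega
    congr 1
    · simp [PySem.List.pyGetD_zero]
    calc List.map (fun i => if i == 0 then PySem.Chars.upper [PySem.List.pyGetD (c :: rest) i ' ']
                else [PySem.List.pyGetD (c :: rest) i ' '])
            (PySem.List.pyRange (0 + 1) (PySem.List.len (c :: rest)))
          = List.map (fun i => [PySem.List.pyGetD (c :: rest) i ' '])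
            (PySem.List.pyRange (0 + 1) (PySem.List.len (c :: rest))) := by
            apply List.map_congr_left; intro i hi; simp [hne i hi]
        _ = (List.map (fun j => PySem.List.pyGetD (c :: rest) j ' ')
            (PySem.List.pyRange (0 + 1) (PySem.List.len (c :: rest)))).map (fun x => [x]) := by
            rw [List.map_map]; rfl
        _ = rest.map (fun x => [x]) := by rw [htail]

-- ===== VERDICT (by name: the statement is the Claim_ definition above) =====
theorem title_maker_spec : Claim_equal_title_maker := by
  intro word _
  unfold Spec_title_maker
  dsimp only [title_maker, title_maker_alt]
  rw [title_maker_lists]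
  cases h : word.toList with
  | nil => rfl
  | cons c rest =>
    simp only []
    congr 1
    have hup : PySem.Chars.upper [c] = [PySem.Chars.upperChar c] := by
      simp [PySem.Chars.upper]
    rw [hup]
    have hsl1 : PySem.List.slice (c :: rest) none (some 1) = [c] := by simp [pysem]
    have hsl2 : PySem.List.slice (c :: rest) (some 1) none = rest := by simp [pysem]
    rw [hsl1, hsl2, hup]
    have := PySem.Chars.join_nil_singletons (PySem.Chars.upperChar c :: rest)
    simp only [List.map_cons] at this
    rw [this]; rfl
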